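-- pv_equiv track=rewrite | github.com/Arsen1302/Code-copy-detector | TestData/solutions/problem_1442_2.py | solution_1442_2
-- ===== SOURCE A (Python) =====
-- from typing import List
--
-- def solution_1442_2(plants: List[int], capacityA: int, capacityB: int) -> int:
--     a, b = 0, len(plants) - 1
--     waterA, waterB = capacityA, capacityB
--     res = 0
--     while a < b:
--         if waterA < plants[a]:
--             res += 1
--             waterA = capacityA
--         waterA -= plants[a]
--         a += 1
--
--         if waterB < plants[b]:
--             res += 1
--             waterB = capacityB
--         waterB -= plants[b]
--         b -= 1
--
--     if a == b and waterA < plants[a] and waterB < plants[a]: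
--         res += 1
--     return res
-- ===== SOURCE B (Python) =====
-- from typing import List
--
-- def solution_1442_2(plants: List[int], capacityA: int, capacityB: int) -> int:
--     n = len(plants)
--     half = n // 2
--     # stage 1: running prefix sums of each gardener's plants (B's half reversed)
--     sumsA = []
--     acc = 0
--     for p in plants[:half]:
--         acc += p
--         sumsA.append(acc)
--     sumsB = []
--     acc = 0
--     for p in reversed(plants[n - half:]):
--         acc += p
--         sumsB.append(acc)
--
--     # stage 2: a refill happens exactly when the prefix sum since the last refill
--     # exceeds the capacity, so count base-relative threshold crossings and
--     # recover the final water level arithmetically.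
--     def crossings(sums, cap):
--         res, base, prev = 0, 0, 0
--         for q in sums:
--             if q - base > cap:
--                 res += 1
--                 base = prev
--             prev = q
--         return res, cap - (prev - base)
--
--     resA, waterA = crossings(sumsA, capacityA)
--     resB, waterB = crossings(sumsB, capacityB)
--     res = resA + resB
--     if n % 2 == 1 and waterA < plants[half] and waterB < plants[half]:
--         res += 1
--     return res
-- ===== Notes on version B (the rewrite author's own statement) =====
-- stated objective: alternative
-- what changed: Instead of simulating the water level with refills in one two-pointer loop, B precomputes running prefix sums for each gardener's half and counts refills as base-relative threshold crossings of those sums (refill iff the sum poured since the last refill exceeds capacity), recovering the final water level arithmetically for the middle-plant check.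
import Mathlib
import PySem

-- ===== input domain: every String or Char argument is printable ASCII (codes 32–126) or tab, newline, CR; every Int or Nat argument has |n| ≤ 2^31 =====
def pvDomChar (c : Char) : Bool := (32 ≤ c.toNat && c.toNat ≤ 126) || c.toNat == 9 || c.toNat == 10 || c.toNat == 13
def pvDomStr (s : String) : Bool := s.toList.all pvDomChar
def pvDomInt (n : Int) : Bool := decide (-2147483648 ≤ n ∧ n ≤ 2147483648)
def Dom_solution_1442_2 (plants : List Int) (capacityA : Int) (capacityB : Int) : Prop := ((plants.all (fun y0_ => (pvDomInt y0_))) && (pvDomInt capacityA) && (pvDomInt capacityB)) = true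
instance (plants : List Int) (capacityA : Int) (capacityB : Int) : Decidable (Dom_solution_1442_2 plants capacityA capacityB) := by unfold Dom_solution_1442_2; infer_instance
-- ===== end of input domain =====

-- B replaces A's water-level simulation by a staged pipeline: running prefix sums per
-- gardener, then a count of base-relative threshold crossings of those sums (alternative).

-- ===== PORT A =====
-- A's while-loop, step for step (every index access is in range at every reachable call)
def solution_1442_2_loop (plants : List Int) (capacityA capacityB : Int)
    (a b waterA waterB res : Int) : Int :=
  if h : a < b then
    solution_1442_2_loop plants capacityA capacityB (a + 1) (b - 1)
      ((if waterA < PySem.List.pyGetD plants a 0 then capacityA else waterA)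
        - PySem.List.pyGetD plants a 0)
      ((if waterB < PySem.List.pyGetD plants b 0 then capacityB else waterB)
        - PySem.List.pyGetD plants b 0)
      (if waterB < PySem.List.pyGetD plants b 0 then
        (if waterA < PySem.List.pyGetD plants a 0 then res + 1 else res) + 1
       else (if waterA < PySem.List.pyGetD plants a 0 then res + 1 else res))
  else
    if a = b ∧ waterA < PySem.List.pyGetD plants a 0 ∧ waterB < PySem.List.pyGetD plants a 0
    then res + 1 else res
termination_by (b - a + 1).toNat
decreasing_by omega

def solution_1442_2 (plants : List Int) (capacityA : Int) (capacityB : Int) : Int :=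
  solution_1442_2_loop plants capacityA capacityB 0 ((plants.length : Int) - 1)
    capacityA capacityB 0

-- ===== PORT B =====
-- running prefix sums starting from acc (Source B's first two accumulation loops)
def pvPrefix (acc : Int) : List Int → List Int
  | [] => []
  | p :: t => (acc + p) :: pvPrefix (acc + p) t

-- one step of Source B's crossings loop; state = (res, base, prev)
def pvCrossStep (cap : Int) (s : Int × Int × Int) (q : Int) : Int × Int × Int :=
  if q - s.2.1 > cap then (s.1 + 1, s.2.2, q) else (s.1, s.2.1, q)

-- Source B's crossings: returns (refill count, final water level)
def pvCrossings (cap : Int) (sums : List Int) : Int × Int :=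
  let s := sums.foldl (pvCrossStep cap) (0, 0, 0)
  (s.1, cap - (s.2.2 - s.2.1))

-- plants[:half] / reversed(plants[n-half:]) ported as take/drop+reverse
-- (the slice bounds are nonnegative and ≤ len, where slice = take/drop exactly)
def solution_1442_2_alt (plants : List Int) (capacityA : Int) (capacityB : Int) : Int :=
  let n := plants.length
  let half := n / 2
  let sumsA := pvPrefix 0 (plants.take half)
  let sumsB := pvPrefix 0 ((plants.drop (n - half)).reverse)
  let rA := pvCrossings capacityA sumsA
  let rB := pvCrossings capacityB sumsB
  let res := rA.1 + rB.1
  if n % 2 = 1 ∧ rA.2 < PySem.List.pyGetD plants (half : Int) 0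
      ∧ rB.2 < PySem.List.pyGetD plants (half : Int) 0
  then res + 1 else res

-- ===== PRECONDITION & SPEC =====
def Spec_solution_1442_2 (plants : List Int) (capacityA : Int) (capacityB : Int) (out : Int) : Prop := out = solution_1442_2_alt plants capacityA capacityB
instance (plants : List Int) (capacityA : Int) (capacityB : Int) (out : Int) : Decidable (Spec_solution_1442_2 plants capacityA capacityB out) := by unfold Spec_solution_1442_2; infer_instance

-- ===== CLAIM (what is proved, stated in full; the proofs are below) =====
def Claim_equal_solution_1442_2 : Prop := ∀ (plants : List Int) (capacityA : Int) (capacityB : Int), Dom_solution_1442_2 plants capacityA capacityB → Spec_solution_1442_2 plants capacityA capacityB (solution_1442_2 plants capacityA capacityB)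

-- ===== LEMMAS AND PROOFS =====

-- final water after watering l starting with w (refilling to cap when short)
def pvW (cap : Int) : List Int → Int → Int
  | [], w => w
  | p :: t, w => pvW cap t ((if w < p then cap else w) - p)

-- number of refills while watering l starting with w
def pvC (cap : Int) : List Int → Int → Int
  | [], _ => 0
  | p :: t, w => (if w < p then (1 : Int) else 0) + pvC cap t ((if w < p then cap else w) - p)

-- B's two-halves value over a segment S, from arbitrary waters/res, phrased via pvW/pvC
def pvRHS (capA capB wA wB res : Int) (S : List Int) : Int :=
  if S.length % 2 = 1 ∧ pvW capA (S.take (S.length / 2)) wA < S.getD (S.length / 2) 0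
      ∧ pvW capB ((S.drop (S.length - S.length / 2)).reverse) wB < S.getD (S.length / 2) 0
  then res + pvC capA (S.take (S.length / 2)) wA
        + pvC capB ((S.drop (S.length - S.length / 2)).reverse) wB + 1
  else res + pvC capA (S.take (S.length / 2)) wA
        + pvC capB ((S.drop (S.length - S.length / 2)).reverse) wB

-- B's crossings loop over the prefix sums of l computes exactly pvC / pvW
lemma cross_foldl (cap : Int) (l : List Int) : ∀ (res base prev : Int),
    ∃ b' p', (pvPrefix prev l).foldl (pvCrossStep cap) (res, base, prev)
        = (res + pvC cap l (cap - (prev - base)), b', p')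
      ∧ cap - (p' - b') = pvW cap l (cap - (prev - base)) := by
  induction l with
  | nil => intro res base prev; exact ⟨base, prev, by simp [pvPrefix, pvC], by simp [pvW]⟩
  | cons p t ih =>
    intro res base prev
    simp only [pvPrefix, List.foldl_cons, pvCrossStep]
    by_cases hc : prev + p - base > cap
    · rw [if_pos hc]
      obtain ⟨b', p', h1, h2⟩ := ih (res + 1) prev (prev + p)
      refine ⟨b', p', ?_, ?_⟩
      · rw [h1]
        have hw : cap - (prev - base) < p := by omega
        have : cap - (prev + p - prev) = cap - p := by ring
        simp only [pvC, if_pos hw, this]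
        exact congrArg (fun z => (z, b', p')) (by ring)
      · rw [h2]
        have hw : cap - (prev - base) < p := by omega
        simp only [pvW, if_pos hw]
        norm_num
    · rw [if_neg hc]
      obtain ⟨b', p', h1, h2⟩ := ih res base (prev + p)
      refine ⟨b', p', ?_, ?_⟩
      · rw [h1]
        have hw : ¬ cap - (prev - base) < p := by omega
        have e : cap - (prev + p - base) = cap - (prev - base) - p := by ring
        simp only [pvC, if_neg hw, e]
        exact congrArg (fun z => (z, b', p')) (by ring)
      · rw [h2]
        have hw : ¬ cap - (prev - base) < p := by omega
        have e : cap - (prev + p - base) = cap - (prev - base) - p := by ring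
        simp only [pvW, if_neg hw, e]

-- pvCrossings of the prefix sums of l from a full tank = (pvC, pvW) from a full tank
lemma crossings_eq (cap : Int) (l : List Int) :
    pvCrossings cap (pvPrefix 0 l) = (pvC cap l cap, pvW cap l cap) := by
  obtain ⟨b', p', h1, h2⟩ := cross_foldl cap l 0 0 0
  simp only [pvCrossings, h1]
  have e : cap - (0 - 0) = cap := by ring
  rw [e] at *
  simp [h2]

lemma getD_append_length (L : List Int) (x : Int) (t : List Int) :
    (L ++ x :: t).getD L.length 0 = x := by
  simp [List.getD]

-- decompose a list of length ≥ 2 as x :: mid ++ [y]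
lemma two_ended (S : List Int) (h : 2 ≤ S.length) :
    ∃ x mid y, S = x :: mid ++ [y] := by
  match S with
  | x :: t =>
    have ht : t ≠ [] := by intro hh; simp [hh] at h
    exact ⟨x, t.dropLast, t.getLast ht, by simp [List.dropLast_append_getLast ht]⟩

-- one from-both-ends iteration absorbed into pvRHS
lemma rhs_step (capA capB wA wB res x y : Int) (mid : List Int) :
    pvRHS capA capB ((if wA < x then capA else wA) - x) ((if wB < y then capB else wB) - y)
      (if wB < y then (if wA < x then res + 1 else res) + 1
        else (if wA < x then res + 1 else res)) mid
    = pvRHS capA capB wA wB res (x :: mid ++ [y]) := by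
  simp only [pvRHS]
  have hl : (x :: mid ++ [y]).length = mid.length + 2 := by simp
  rw [hl]
  have hh : (mid.length + 2) / 2 = mid.length / 2 + 1 := by omega
  rw [hh]
  have hd : mid.length + 2 - (mid.length / 2 + 1) = (mid.length - mid.length / 2) + 1 := by omega
  rw [hd]
  have htake : (x :: mid ++ [y]).take (mid.length / 2 + 1) = x :: mid.take (mid.length / 2) := by
    simp [List.take_append, Nat.sub_eq_zero_of_le (Nat.div_le_self _ _)]
  rw [htake]
  have hdrop : (x :: mid ++ [y]).drop ((mid.length - mid.length / 2) + 1)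
      = mid.drop (mid.length - mid.length / 2) ++ [y] := by
    simp [List.drop_append, Nat.sub_eq_zero_of_le (Nat.sub_le _ _)]
  rw [hdrop]
  have hrev : (mid.drop (mid.length - mid.length / 2) ++ [y]).reverse
      = y :: (mid.drop (mid.length - mid.length / 2)).reverse := by simp
  rw [hrev]
  have hmod : (mid.length + 2) % 2 = mid.length % 2 := by omega
  rw [hmod]
  simp only [pvW, pvC]
  by_cases hodd : mid.length % 2 = 1
  · have hlt : mid.length / 2 < mid.length := by omega
    have hgetD : (x :: mid ++ [y]).getD (mid.length / 2 + 1) 0 = mid.getD (mid.length / 2) 0 := by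
      simp [List.getD, List.getElem?_append_left hlt]
    rw [hgetD]
    simp only [hodd, true_and]
    split_ifs <;> ring
  · simp only [hodd, false_and, if_false]
    split_ifs <;> ring

-- The main invariant: A's loop on L ++ S ++ R with a = |L|, b = |L| + |S| - 1 computes pvRHS on S.
lemma loop_eq_rhs (capA capB : Int) :
    ∀ (k : Nat) (S L R : List Int) (wA wB res : Int), S.length = k →
      solution_1442_2_loop (L ++ S ++ R) capA capB
        (L.length : Int) ((L.length : Int) + (S.length : Int) - 1) wA wB res
      = pvRHS capA capB wA wB res S := by
  intro k
  induction k using Nat.strong_induction_on with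
  | _ k ih =>
  intro S L R wA wB res hk
  rcases Nat.lt_or_ge k 2 with h2 | h2
  · interval_cases k
    · -- S = []
      obtain rfl : S = [] := List.length_eq_zero_iff.mp hk
      simp only [List.length_nil, Nat.cast_zero]
      rw [solution_1442_2_loop, dif_neg (by omega),
        if_neg (by rintro ⟨h, -⟩; omega)]
      simp [pvRHS, pvC]
    · -- S = [x]
      obtain ⟨x, rfl⟩ := List.length_eq_one_iff.mp hk
      simp only [List.length_cons, List.length_nil, Nat.cast_one, zero_add]
      rw [solution_1442_2_loop, dif_neg (by omega)]
      have hx : PySem.List.pyGetD (L ++ [x] ++ R) ((L.length : Int)) 0 = x := by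
        have e : L ++ [x] ++ R = L ++ x :: R := by simp
        rw [e, PySem.List.pyGetD_natCast, getD_append_length]
      have hrhs : pvRHS capA capB wA wB res [x] = if wA < x ∧ wB < x then res + 1 else res := by
        simp [pvRHS, pvW, pvC]
      rw [hx, hrhs]
      have hc : ((L.length : Int) = (L.length : Int) + 1 - 1) := by ring
      split_ifs with h1 h2 h2
      · rfl
      · exact absurd h1.2 h2
      · exact absurd ⟨hc, h2⟩ h1
      · rfl
  · obtain ⟨x, mid, y, rfl⟩ := two_ended S (by omega)
    have hklen : mid.length + 2 = k := by simpa using hk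
    have hab : (L.length : Int) < (L.length : Int) + ((x :: mid ++ [y]).length : Int) - 1 := by
      have e : (x :: mid ++ [y]).length = mid.length + 2 := by simp
      rw [e]; push_cast; omega
    rw [solution_1442_2_loop, dif_pos hab]
    have hpa : PySem.List.pyGetD (L ++ (x :: mid ++ [y]) ++ R) ((L.length : Int)) 0 = x := by
      have e : L ++ (x :: mid ++ [y]) ++ R = L ++ x :: (mid ++ [y] ++ R) := by simp
      rw [e, PySem.List.pyGetD_natCast, getD_append_length]
    have hpb : PySem.List.pyGetD (L ++ (x :: mid ++ [y]) ++ R)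
        ((L.length : Int) + ((x :: mid ++ [y]).length : Int) - 1) 0 = y := by
      have e : L ++ (x :: mid ++ [y]) ++ R = (L ++ x :: mid) ++ y :: R := by simp
      have e2 : ((L.length : Int) + ((x :: mid ++ [y]).length : Int) - 1)
          = (((L ++ x :: mid).length : Nat) : Int) := by
        simp; ring
      rw [e, e2, PySem.List.pyGetD_natCast, getD_append_length]
    rw [hpa, hpb]
    have hrec := ih mid.length (by omega) mid (L ++ [x]) (y :: R)
      ((if wA < x then capA else wA) - x) ((if wB < y then capB else wB) - y)
      (if wB < y then (if wA < x then res + 1 else res) + 1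
        else (if wA < x then res + 1 else res)) rfl
    have eb : (((L ++ [x]).length : Nat) : Int) + (mid.length : Int) - 1
        = ((L.length : Int) + ((x :: mid ++ [y]).length : Int) - 1) - 1 := by
      simp; ring
    have eL : (L ++ [x]) ++ mid ++ (y :: R) = L ++ (x :: mid ++ [y]) ++ R := by simp
    have ea : (((L ++ [x]).length : Nat) : Int) = (L.length : Int) + 1 := by simp
    rw [eb, eL, ea] at hrec
    rw [hrec]
    exact rhs_step capA capB wA wB res x y mid

lemma rhs_eq_alt (plants : List Int) (capA capB : Int) :
    pvRHS capA capB capA capB 0 plants = solution_1442_2_alt plants capA capB := by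
  simp only [pvRHS, solution_1442_2_alt, crossings_eq, PySem.List.pyGetD_natCast]
  by_cases hp : plants.length % 2 = 1
  · simp only [hp, true_and]
    split_ifs <;> ring
  · simp only [hp, false_and, if_false]
    ring

-- ===== VERDICT (by name: the statement is the Claim_ definition above) =====
theorem solution_1442_2_spec : Claim_equal_solution_1442_2 := by
  intro plants capA capB _
  unfold Spec_solution_1442_2 solution_1442_2
  have h := loop_eq_rhs capA capB plants.length plants [] [] capA capB 0 rfl
  simp only [List.nil_append, List.append_nil, List.length_nil, Nat.cast_zero] at h
  have e : (0 : Int) + (plants.length : Int) - 1 = (plants.length : Int) - 1 := by ring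
  rw [e] at h
  rw [h, rhs_eq_alt]
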